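-- pv_equiv track=rewrite | github.com/Aratech-IA/serenicia | app5_ehpad_messaging/batch/algo_affectation_V3.py | make_dispo_dict
-- ===== SOURCE A (Python) =====
-- def make_dispo_dict(residents, affectation_employees_manual):
--     if not affectation_employees_manual:
--         return [{}, {}]
--     nb_residents = (len(residents))
--     dict_affectation_final = affectation_employees_manual.copy()
--     list_dict_affectation = []
--     for tour in range(2):
--         for _ in range(nb_residents):
--             employee_concerned = min(dict_affectation_final, key=dict_affectation_final.get)
--             if tour < len(dict_affectation_final):  # this is for the case one employee in UP
--                 dict_affectation_final[employee_concerned] += 1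
--         list_dict_affectation.append(dict_affectation_final.copy())
--     return list_dict_affectation
-- ===== SOURCE B (Python) =====
-- # B: water-filling closed form per tour — computes the final token levels directly
-- # from the sorted values (O(E log E) per tour, independent of len(residents))
-- # instead of simulating one token at a time (A is O(len(residents)*E)).
-- def _fill(d, R):
--     # distribute R tokens one-at-a-time to the minimum (first key on ties) -- closed form
--     w = sorted(d.values())
--     k = 0
--     spent = 0
--     while k + 1 < len(w) and spent + (k + 1) * (w[k + 1] - w[k]) <= R:
--         spent += (k + 1) * (w[k + 1] - w[k])
--         k += 1
--     q, r = divmod(R - spent, k + 1)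
--     L = w[k] + q
--     out = {}
--     for key, v in d.items():
--         if v <= L and r > 0:
--             out[key] = L + 1
--             r -= 1
--         elif v <= L:
--             out[key] = L
--         else:
--             out[key] = v
--     return out
--
-- def make_dispo_dict(residents, affectation_employees_manual):
--     if not affectation_employees_manual:
--         return [{}, {}]
--     R = len(residents)
--     first = _fill(affectation_employees_manual, R)
--     second = _fill(first, R) if len(first) > 1 else first.copy()
--     return [first, second]
-- ===== Notes on version B (the rewrite author's own statement) =====
-- stated objective: faster
-- what changed: B replaces A's token-at-a-time simulation (each of the len(residents) tokens rescans the whole dict for the current minimum, twice) by a closed-form water-filling computation: per tour it sorts the values once, finds the final water level and remainder arithmetically, and emits each employee's final count directly; Pre_ only excludes association lists with duplicate keys, which represent no Python dict argument at all.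
import Mathlib
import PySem

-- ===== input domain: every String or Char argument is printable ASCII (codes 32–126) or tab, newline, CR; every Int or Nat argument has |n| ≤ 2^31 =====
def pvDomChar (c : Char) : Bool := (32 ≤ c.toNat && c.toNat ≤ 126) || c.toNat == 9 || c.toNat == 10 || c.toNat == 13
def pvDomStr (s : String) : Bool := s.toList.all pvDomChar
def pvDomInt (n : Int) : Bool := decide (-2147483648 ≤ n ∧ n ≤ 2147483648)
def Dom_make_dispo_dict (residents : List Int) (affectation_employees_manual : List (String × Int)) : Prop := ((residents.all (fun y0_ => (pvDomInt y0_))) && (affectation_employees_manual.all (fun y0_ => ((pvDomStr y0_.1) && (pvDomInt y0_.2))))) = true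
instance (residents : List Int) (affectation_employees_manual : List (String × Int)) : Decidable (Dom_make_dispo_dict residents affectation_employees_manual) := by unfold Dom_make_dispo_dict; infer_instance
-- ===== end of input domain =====

-- B replaces A's token-at-a-time simulation (O(len(residents)*E) per tour) by a closed-form
-- water-filling computation over the sorted values (O(E log E) per tour).

-- ===== PORT A =====
-- dict_affectation_final[employee_concerned] += 1 : update the value at that key (keys are unique)
def pvIncrKey : List (String × Int) → String → List (String × Int)
  | [], _ => []
  | p :: t, x => if p.1 = x then (p.1, p.2 + 1) :: t else p :: pvIncrKey t x

-- one iteration of A's inner loop: employee_concerned = min(d, key=d.get); if tour < len(d): d[k] += 1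
def pvAStep (tour : Nat) (d : List (String × Int)) : List (String × Int) :=
  match PySem.List.min? d (fun p => p.2) with
  | none => d          -- unreachable: the dict is never empty here
  | some p => if (tour : Int) < (d.length : Int) then pvIncrKey d p.1 else d

def make_dispo_dict (residents : List Int) (affectation_employees_manual : List (String × Int)) : List (List (String × Int)) :=
  if affectation_employees_manual = [] then [[], []]
  else
    let nb_residents := residents.length
    ((List.range 2).foldl
      (fun (st : List (String × Int) × List (List (String × Int))) tour =>
        let d := (List.range nb_residents).foldl (fun d _ => pvAStep tour d) st.1
        (d, st.2 ++ [d]))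
      (affectation_employees_manual, [])).2

-- ===== PORT B =====
-- the while loop of _fill: advance k while the next level step is affordable
def pvLevelLoop (w : List Int) (R : Int) (k : Nat) (spent : Int) : Nat × Int :=
  if h : k + 1 < w.length ∧
      spent + ((k : Int) + 1) * (PySem.List.pyGetD w ((k : Int) + 1) 0 - PySem.List.pyGetD w (k : Int) 0) ≤ R then
    pvLevelLoop w R (k + 1) (spent + ((k : Int) + 1) * (PySem.List.pyGetD w ((k : Int) + 1) 0 - PySem.List.pyGetD w (k : Int) 0))
  else (k, spent)
termination_by w.length - k
decreasing_by omega

-- the output loop of _fill: first r keys with v <= L get L+1, other such keys get L, the rest keep v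
def pvBuildOut : List (String × Int) → Int → Int → List (String × Int)
  | [], _, _ => []
  | p :: t, L, r =>
    if p.2 ≤ L ∧ 0 < r then (p.1, L + 1) :: pvBuildOut t L (r - 1)
    else if p.2 ≤ L then (p.1, L) :: pvBuildOut t L r
    else p :: pvBuildOut t L r

def pvFill (d : List (String × Int)) (R : Int) : List (String × Int) :=
  let w := PySem.List.sorted (d.map (fun p => p.2)) (fun v => v) false
  let ks := pvLevelLoop w R 0 0
  let q := PySem.Int.floordiv (R - ks.2) ((ks.1 : Int) + 1)
  let r := PySem.Int.mod (R - ks.2) ((ks.1 : Int) + 1)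
  let L := PySem.List.pyGetD w (ks.1 : Int) 0 + q
  pvBuildOut d L r

def make_dispo_dict_alt (residents : List Int) (affectation_employees_manual : List (String × Int)) : List (List (String × Int)) :=
  if affectation_employees_manual = [] then [[], []]
  else
    let R := (residents.length : Int)
    let first := pvFill affectation_employees_manual R
    let second := if 1 < first.length then pvFill first R else first
    [first, second]

-- ===== PRECONDITION & SPEC =====
-- Pre_ excludes association lists with duplicate keys: the Python argument is a dict, which
-- cannot carry duplicate keys, so such lists represent no Python input at all.
def Pre_make_dispo_dict (residents : List Int) (affectation_employees_manual : List (String × Int)) : Prop :=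
  (affectation_employees_manual.map Prod.fst).Nodup
instance (residents : List Int) (affectation_employees_manual : List (String × Int)) : Decidable (Pre_make_dispo_dict residents affectation_employees_manual) := by unfold Pre_make_dispo_dict; infer_instance

def pvWitness_make_dispo_dict : List Int × (List (String × Int)) := ([0, 0, 0], [("a", 1), ("b", 2)])

def Spec_make_dispo_dict (residents : List Int) (affectation_employees_manual : List (String × Int)) (out : List (List (String × Int))) : Prop := out = make_dispo_dict_alt residents affectation_employees_manual
instance (residents : List Int) (affectation_employees_manual : List (String × Int)) (out : List (List (String × Int))) : Decidable (Spec_make_dispo_dict residents affectation_employees_manual out) := by unfold Spec_make_dispo_dict; infer_instance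

-- ===== CLAIM (what is proved, stated in full; the proofs are below) =====
def Claim_equal_make_dispo_dict : Prop := ∀ (residents : List Int) (affectation_employees_manual : List (String × Int)), Dom_make_dispo_dict residents affectation_employees_manual → Pre_make_dispo_dict residents affectation_employees_manual → Spec_make_dispo_dict residents affectation_employees_manual (make_dispo_dict residents affectation_employees_manual)

-- ===== LEMMAS AND PROOFS =====

-- proof-side notions: the tokens needed to raise every value to level L, the number of values ≤ L,
-- "bump the first pair whose value is m", A's inner step with its guard dropped, and a plain iterator
def pvNeed (vs : List Int) (L : Int) : Int := (vs.map (fun v => max 0 (L - v))).sum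
def pvCnt (vs : List Int) (L : Int) : Int := (vs.countP (fun v => decide (v ≤ L)) : Int)
def pvBump : List (String × Int) → Int → List (String × Int)
  | [], _ => []
  | p :: t, m => if p.2 = m then (p.1, p.2 + 1) :: t else p :: pvBump t m
def pvStep (d : List (String × Int)) : List (String × Int) :=
  match PySem.List.min? d (fun p => p.2) with
  | none => d
  | some p => pvIncrKey d p.1
def pvIter {α : Type} (f : α → α) : Nat → α → α
  | 0, a => a
  | n + 1, a => pvIter f n (f a)

lemma pvIterSucc' {α : Type} (f : α → α) : ∀ (n : Nat) (a : α),
    pvIter f (n + 1) a = f (pvIter f n a) := by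
  intro n
  induction n with
  | zero => intro a; rfl
  | succ n ih => intro a; show pvIter f (n+1) (f a) = _; rw [ih]; rfl

lemma pvFoldlRangeConst {α : Type} (f : α → α) : ∀ (n : Nat) (a : α),
    (List.range n).foldl (fun d _ => f d) a = pvIter f n a := by
  intro n
  induction n with
  | zero => intro a; simp [pvIter]
  | succ n ih =>
    intro a
    rw [List.range_succ, List.foldl_append, ih, pvIterSucc']
    simp

lemma pvMapFstIncrKey (d : List (String × Int)) (x : String) :
    (pvIncrKey d x).map Prod.fst = d.map Prod.fst := by
  induction d with
  | nil => rfl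
  | cons p t ih => simp only [pvIncrKey]; split <;> simp_all

lemma pvMapFstStep (d : List (String × Int)) : (pvStep d).map Prod.fst = d.map Prod.fst := by
  unfold pvStep
  split
  · rfl
  · exact pvMapFstIncrKey d _

lemma pvLenStep (d : List (String × Int)) : (pvStep d).length = d.length := by
  have h1 := congrArg List.length (pvMapFstStep d)
  simpa using h1

lemma pvMapFstIter (n : Nat) : ∀ (d : List (String × Int)),
    (pvIter pvStep n d).map Prod.fst = d.map Prod.fst := by
  induction n with
  | zero => intro d; rfl
  | succ n ih => intro d; show (pvIter pvStep n (pvStep d)).map _ = _; rw [ih, pvMapFstStep]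
lemma pvFoldlSome {P : Type} (f : Option P → P → Option P) (g : P → P → P)
    (hf : ∀ m y, f (some m) y = some (g m y)) : ∀ (t : List P) (m : P),
    t.foldl f (some m) = some (t.foldl g m) := by
  intro t
  induction t with
  | nil => intro m; rfl
  | cons y t ih =>
    intro m
    simp only [List.foldl_cons, hf]
    exact ih (g m y)

lemma pvMin?Cons (key : (String × Int) → Int) (t : List (String × Int)) (x : String × Int) :
    PySem.List.min? (x :: t) key = some (t.foldl (fun m y => if key y < key m then y else m) x) := by
  unfold PySem.List.min?
  rw [List.foldl_cons]
  exact pvFoldlSome _ _ (fun m y => by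
    show (if key y < key m then some y else some m) = _
    split <;> rfl) t x

lemma pvFoldlMinLe : ∀ (t : List (String × Int)) (x : String × Int),
    (t.foldl (fun m y => if y.2 < m.2 then y else m) x).2 ≤ x.2 := by
  intro t
  induction t with
  | nil => intro x; exact Int.le_refl _
  | cons y t ih =>
    intro x
    simp only [List.foldl_cons]
    by_cases h : y.2 < x.2
    · rw [if_pos h]; have := ih y; omega
    · rw [if_neg h]; exact ih x

lemma pvFoldlMinIsMin : ∀ (t : List (String × Int)) (x : String × Int),
    ∀ y ∈ x :: t, (t.foldl (fun m y => if y.2 < m.2 then y else m) x).2 ≤ y.2 := by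
  intro t
  induction t with
  | nil =>
    intro x y hy
    rcases List.mem_cons.mp hy with rfl | hy
    · exact Int.le_refl _
    · simp at hy
  | cons z t ih =>
    intro x y hy
    simp only [List.foldl_cons]
    by_cases hzx : z.2 < x.2
    · rw [if_pos hzx]
      have hle := pvFoldlMinLe t z
      rcases List.mem_cons.mp hy with rfl | hy
      · omega
      rcases List.mem_cons.mp hy with rfl | hy
      · omega
      · exact ih z y (by simp [hy])
    · rw [if_neg hzx]
      have hle := pvFoldlMinLe t x
      rcases List.mem_cons.mp hy with rfl | hy
      · omega
      rcases List.mem_cons.mp hy with rfl | hy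
      · omega
      · exact ih x y (by simp [hy])

lemma pvMinSplit : ∀ (t : List (String × Int)) (x : String × Int),
    ∃ l1 l2, x :: t = l1 ++ (t.foldl (fun m y => if y.2 < m.2 then y else m) x) :: l2 ∧
      ∀ y ∈ l1, (t.foldl (fun m y => if y.2 < m.2 then y else m) x).2 < y.2 := by
  intro t
  induction t with
  | nil => intro x; exact ⟨[], [], rfl, by simp⟩
  | cons y t ih =>
    intro x
    simp only [List.foldl_cons]
    by_cases h : y.2 < x.2
    · rw [if_pos h]
      obtain ⟨l1, l2, he, hgt⟩ := ih y
      refine ⟨x :: l1, l2, ?_, ?_⟩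
      · rw [List.cons_append, ← he]
      · intro z hz
        rcases List.mem_cons.mp hz with rfl | hz
        · have hmy := pvFoldlMinLe t y
          omega
        · exact hgt z hz
    · rw [if_neg h]
      obtain ⟨l1, l2, he, hgt⟩ := ih x
      rcases l1 with _ | ⟨a, l1'⟩
      · simp only [List.nil_append, List.cons.injEq] at he
        obtain ⟨h1, h2⟩ := he
        refine ⟨[], y :: l2, ?_, by simp⟩
        rw [List.nil_append, ← h1, h2]
      · simp only [List.cons_append, List.cons.injEq] at he
        obtain ⟨rfl, h2⟩ := he
        refine ⟨x :: y :: l1', l2, ?_, ?_⟩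
        · exact congrArg (fun l => x :: y :: l) h2
        · intro z hz
          have hax := hgt x (by simp)
          rcases List.mem_cons.mp hz with rfl | hz
          · exact hax
          rcases List.mem_cons.mp hz with rfl | hz
          · omega
          · exact hgt z (by simp [hz])

lemma pvIncrKeyAppend : ∀ (l1 : List (String × Int)) (l2 : List (String × Int)) (p : String × Int),
    p.1 ∉ l1.map Prod.fst →
    pvIncrKey (l1 ++ p :: l2) p.1 = l1 ++ (p.1, p.2 + 1) :: l2 := by
  intro l1
  induction l1 with
  | nil => intro l2 p _; simp [pvIncrKey]
  | cons a t ih =>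
    intro l2 p hp
    simp only [List.map_cons, List.mem_cons] at hp
    have hne : ¬ a.1 = p.1 := fun hh => hp (Or.inl hh.symm)
    simp only [List.cons_append, pvIncrKey, if_neg hne]
    rw [ih l2 p (fun hh => hp (Or.inr hh))]

lemma pvBumpAppend : ∀ (l1 : List (String × Int)) (l2 : List (String × Int)) (p : String × Int),
    (∀ y ∈ l1, y.2 ≠ p.2) →
    pvBump (l1 ++ p :: l2) p.2 = l1 ++ (p.1, p.2 + 1) :: l2 := by
  intro l1
  induction l1 with
  | nil => intro l2 p _; simp [pvBump]
  | cons a t ih =>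
    intro l2 p hp
    simp only [List.cons_append, pvBump, if_neg (hp a (by simp))]
    rw [ih l2 p (fun y hy => hp y (by simp [hy]))]
lemma pvNodupNotMem : ∀ (l1 : List String) (x : String) (l2 : List String),
    (l1 ++ x :: l2).Nodup → x ∉ l1 := by
  intro l1
  induction l1 with
  | nil => intro x l2 _ h; simp at h
  | cons a t ih =>
    intro x l2 hnd hx
    rw [List.cons_append, List.nodup_cons] at hnd
    rcases List.mem_cons.mp hx with rfl | hx
    · exact hnd.1 (List.mem_append.mpr (Or.inr (by simp)))
    · exact ih x l2 hnd.2 hx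

lemma pvStepEqBump (d : List (String × Int)) (p : String × Int)
    (hnd : (d.map Prod.fst).Nodup) (hm : PySem.List.min? d (fun p => p.2) = some p) :
    pvStep d = pvBump d p.2 := by
  rcases d with _ | ⟨x, t⟩
  · exact absurd hm (by simp [PySem.List.min?])
  · rw [pvMin?Cons] at hm
    have hp : p = t.foldl (fun m y => if y.2 < m.2 then y else m) x := by
      injection hm.symm
    obtain ⟨l1, l2, he, hgt⟩ := pvMinSplit t x
    rw [← hp] at he hgt
    have hstep : pvStep (x :: t) = pvIncrKey (x :: t) p.1 := by
      unfold pvStep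
      rw [pvMin?Cons, ← hp]
    rw [hstep, he]
    rw [he] at hnd
    have hnotin : p.1 ∉ l1.map Prod.fst := by
      rw [List.map_append, List.map_cons] at hnd
      exact pvNodupNotMem _ _ _ hnd
    rw [pvIncrKeyAppend l1 l2 p hnotin,
        pvBumpAppend l1 l2 p (fun y hy => by have := hgt y hy; omega)]

lemma pvCntCons (a : String × Int) (t : List (String × Int)) (L : Int) :
    pvCnt ((a :: t).map Prod.snd) L = (if a.2 ≤ L then 1 else 0) + pvCnt (t.map Prod.snd) L := by
  simp only [pvCnt, List.map_cons, List.countP_cons]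
  split <;> simp_all <;> omega

lemma pvMapFstBuildOut (L : Int) : ∀ (d : List (String × Int)) (r : Int),
    (pvBuildOut d L r).map Prod.fst = d.map Prod.fst := by
  intro d
  induction d with
  | nil => intro r; rfl
  | cons a t ih =>
    intro r
    simp only [pvBuildOut]
    split
    · simp [ih]
    · split <;> simp [ih]

lemma pvBuildOutValuesGe (L : Int) : ∀ (d : List (String × Int)) (r : Int),
    ∀ y ∈ pvBuildOut d L r, L ≤ y.2 := by
  intro d
  induction d with
  | nil => intro r y hy; simp [pvBuildOut] at hy
  | cons a t ih =>
    intro r y hy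
    simp only [pvBuildOut] at hy
    split at hy
    · rcases List.mem_cons.mp hy with rfl | hy
      · show L ≤ L + 1; omega
      · exact ih _ y hy
    · split at hy
      · rcases List.mem_cons.mp hy with rfl | hy
        · exact Int.le_refl _
        · exact ih _ y hy
      · rcases List.mem_cons.mp hy with rfl | hy
        · omega
        · exact ih _ y hy

lemma pvBuildOutExistsL (L : Int) : ∀ (d : List (String × Int)) (r : Int),
    0 ≤ r → r < pvCnt (d.map Prod.snd) L → ∃ y ∈ pvBuildOut d L r, y.2 = L := by
  intro d
  induction d with
  | nil => intro r h0 hc; simp [pvCnt] at hc; omega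
  | cons a t ih =>
    intro r h0 hc
    rw [pvCntCons] at hc
    simp only [pvBuildOut]
    by_cases ha : a.2 ≤ L
    · rw [if_pos ha] at hc
      by_cases hr : 0 < r
      · rw [if_pos ⟨ha, hr⟩]
        obtain ⟨y, hy, hyL⟩ := ih (r - 1) (by omega) (by omega)
        exact ⟨y, by simp [hy], hyL⟩
      · rw [if_neg (fun hh => hr hh.2), if_pos ha]
        exact ⟨(a.1, L), by simp⟩
    · rw [if_neg ha] at hc
      rw [if_neg (fun hh => ha hh.1), if_neg ha]
      obtain ⟨y, hy, hyL⟩ := ih r h0 (by omega)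
      exact ⟨y, by simp [hy], hyL⟩

lemma pvMinBuildOut (L : Int) (d : List (String × Int)) (r : Int) (p : String × Int)
    (hr0 : 0 ≤ r) (hrc : r < pvCnt (d.map Prod.snd) L)
    (hm : PySem.List.min? (pvBuildOut d L r) (fun p => p.2) = some p) : p.2 = L := by
  obtain ⟨y, hy, hyL⟩ := pvBuildOutExistsL L d r hr0 hrc
  rcases hb : pvBuildOut d L r with _ | ⟨x, t⟩
  · rw [hb] at hy; simp at hy
  · rw [hb, pvMin?Cons] at hm
    have hp : p = t.foldl (fun m y => if y.2 < m.2 then y else m) x := by injection hm.symm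
    rw [hb] at hy
    have h1 := pvFoldlMinIsMin t x y hy
    rw [← hp] at h1
    have h2 := pvBuildOutValuesGe L d r p (by rw [hb]; exact hp ▸ (by
      obtain ⟨l1, l2, he, _⟩ := pvMinSplit t x
      rw [he]; exact List.mem_append.mpr (Or.inr (by simp))))
    omega

lemma pvBumpBuildOut (L : Int) : ∀ (d : List (String × Int)) (r : Int),
    0 ≤ r → r < pvCnt (d.map Prod.snd) L →
    pvBump (pvBuildOut d L r) L = pvBuildOut d L (r + 1) := by
  intro d
  induction d with
  | nil => intro r h0 hc; simp [pvCnt] at hc; omega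
  | cons a t ih =>
    intro r h0 hc
    rw [pvCntCons] at hc
    simp only [pvBuildOut]
    by_cases ha : a.2 ≤ L
    · rw [if_pos ha] at hc
      by_cases hr : 0 < r
      · rw [if_pos ⟨ha, hr⟩, if_pos ⟨ha, by omega⟩]
        simp only [pvBump, if_neg (by omega : ¬ (L + 1 = L))]
        rw [ih (r - 1) (by omega) (by omega)]
        have he : r - 1 + 1 = r := by omega
        have he2 : r + 1 - 1 = r := by omega
        rw [he, he2]
      · have hr0' : r = 0 := by omega
        subst hr0'
        rw [if_neg (fun hh => hr hh.2), if_pos ha,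
            if_pos (⟨ha, by omega⟩ : a.2 ≤ L ∧ (0 : Int) < 0 + 1)]
        have he : (0 : Int) + 1 - 1 = 0 := by omega
        rw [he]
        show (if (a.1, L).2 = L then ((a.1, L).1, (a.1, L).2 + 1) :: pvBuildOut t L 0
              else (a.1, L) :: pvBump (pvBuildOut t L 0) L) = _
        rw [if_pos rfl]
    · rw [if_neg ha] at hc
      rw [if_neg (fun hh => ha hh.1), if_neg ha, if_neg (fun hh => ha hh.1), if_neg ha]
      simp only [pvBump, if_neg (by omega : ¬ (a.2 = L))]
      rw [ih r h0 (by omega)]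
lemma pvCntNonneg (vs : List Int) (L : Int) : 0 ≤ pvCnt vs L := by
  exact Int.natCast_nonneg _

lemma pvNeedCons (a : Int) (t : List Int) (L : Int) :
    pvNeed (a :: t) L = max 0 (L - a) + pvNeed t L := by
  simp [pvNeed]

lemma pvNeedNonneg (L : Int) : ∀ (vs : List Int), 0 ≤ pvNeed vs L := by
  intro vs
  induction vs with
  | nil => simp [pvNeed]
  | cons a t ih => rw [pvNeedCons]; omega

lemma pvBuildOutZero (L : Int) : ∀ (d : List (String × Int)),
    pvNeed (d.map Prod.snd) L = 0 → pvBuildOut d L 0 = d := by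
  intro d
  induction d with
  | nil => intro _; rfl
  | cons a t ih =>
    intro h
    rw [List.map_cons, pvNeedCons] at h
    have ht := pvNeedNonneg L (t.map Prod.snd)
    have ha : L ≤ a.2 := by omega
    simp only [pvBuildOut, if_neg (fun hh : a.2 ≤ L ∧ (0:Int) < 0 => absurd hh.2 (by omega))]
    by_cases haL : a.2 ≤ L
    · rw [if_pos haL, ih (by omega)]
      have hal : a.2 = L := by omega
      rw [← hal]
    · rw [if_neg haL, ih (by omega)]

lemma pvBuildOutRoll (L : Int) : ∀ (d : List (String × Int)),
    pvBuildOut d (L - 1) (pvCnt (d.map Prod.snd) (L - 1)) = pvBuildOut d L 0 := by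
  intro d
  induction d with
  | nil => rfl
  | cons a t ih =>
    have hcnt := pvCntNonneg (t.map Prod.snd) (L - 1)
    rw [pvCntCons]
    simp only [pvBuildOut]
    by_cases ha : a.2 ≤ L - 1
    · rw [if_pos ha, if_pos ⟨ha, by omega⟩,
          if_neg (fun hh : a.2 ≤ L ∧ (0:Int) < 0 => absurd hh.2 (by omega)),
          if_pos (by omega : a.2 ≤ L)]
      have e1 : (1:Int) + pvCnt (t.map Prod.snd) (L - 1) - 1 = pvCnt (t.map Prod.snd) (L - 1) := by
        omega
      have e2 : L - 1 + 1 = L := by omega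
      rw [e1, e2, ih]
    · rw [if_neg ha,
          if_neg (fun hh : a.2 ≤ L - 1 ∧ (0:Int) < 0 + pvCnt (t.map Prod.snd) (L - 1) => ha hh.1),
          if_neg ha,
          if_neg (fun hh : a.2 ≤ L ∧ (0:Int) < 0 => absurd hh.2 (by omega))]
      have e3 : (0:Int) + pvCnt (t.map Prod.snd) (L - 1) = pvCnt (t.map Prod.snd) (L - 1) := by
        omega
      rw [e3, ih]
      by_cases haL : a.2 ≤ L
      · rw [if_pos haL]
        have hal : a.2 = L := by omega
        rw [← hal]
      · rw [if_neg haL]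

lemma pvNeedSucc (L : Int) : ∀ (vs : List Int), pvNeed vs (L + 1) = pvNeed vs L + pvCnt vs L := by
  intro vs
  induction vs with
  | nil => simp [pvNeed, pvCnt]
  | cons a t ih =>
    rw [pvNeedCons, pvNeedCons, ih]
    have : pvCnt (a :: t) L = (if a ≤ L then 1 else 0) + pvCnt t L := by
      simp only [pvCnt, List.countP_cons]
      split <;> simp_all <;> omega
    rw [this]
    split <;> omega

lemma pvNeedZeroOfCntZero (L : Int) : ∀ (vs : List Int),
    pvCnt vs (L - 1) = 0 → pvNeed vs L = 0 := by
  intro vs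
  induction vs with
  | nil => intro _; simp [pvNeed]
  | cons a t ih =>
    intro h
    have hc : pvCnt (a :: t) (L - 1) = (if a ≤ L - 1 then 1 else 0) + pvCnt t (L - 1) := by
      simp only [pvCnt, List.countP_cons]
      split <;> simp_all <;> omega
    rw [hc] at h
    have hcnt' := pvCntNonneg t (L - 1)
    rw [pvNeedCons]
    by_cases ha : a ≤ L - 1
    · rw [if_pos ha] at h; omega
    · rw [if_neg ha] at h
      rw [ih (by omega)]
      omega

lemma pvMainT : ∀ (R : Nat) (d : List (String × Int)) (L r : Int),
    (d.map Prod.fst).Nodup → pvNeed (d.map Prod.snd) L + r = (R : Int) →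
    0 ≤ r → r < pvCnt (d.map Prod.snd) L →
    pvIter pvStep R d = pvBuildOut d L r := by
  intro R
  induction R with
  | zero =>
    intro d L r hnd hsum h0 hc
    have hn := pvNeedNonneg L (d.map Prod.snd)
    have hr : r = 0 := by omega
    subst hr
    show d = _
    exact (pvBuildOutZero L d (by omega)).symm
  | succ R ih =>
    intro d L r hnd hsum h0 hc
    by_cases hr : 0 < r
    · have hstep := ih d L (r - 1) hnd (by omega) (by omega) (by omega)
      rw [pvIterSucc', hstep]
      have hne : pvBuildOut d L (r - 1) ≠ [] := by
        obtain ⟨y, hy, _⟩ := pvBuildOutExistsL L d (r - 1) (by omega) (by omega)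
        intro hnil; rw [hnil] at hy; simp at hy
      rcases hm : PySem.List.min? (pvBuildOut d L (r - 1)) (fun p => p.2) with _ | p
      · rw [PySem.List.min?_eq_none_iff] at hm; exact absurd hm hne
      · have hpL := pvMinBuildOut L d (r - 1) p (by omega) (by omega) hm
        have hb := pvStepEqBump (pvBuildOut d L (r - 1)) p
          (by rw [pvMapFstBuildOut]; exact hnd) hm
        rw [hb, hpL, pvBumpBuildOut L d (r - 1) (by omega) (by omega)]
        have : r - 1 + 1 = r := by omega
        rw [this]
    · have hrz : r = 0 := by omega
      subst hrz
      -- need d L = R + 1 ≥ 1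
      have hneed : pvNeed (d.map Prod.snd) L = (R : Int) + 1 := by omega
      have hcnn := pvCntNonneg (d.map Prod.snd) (L - 1)
      have hc1 : 0 < pvCnt (d.map Prod.snd) (L - 1) := by
        rcases Int.lt_or_le 0 (pvCnt (d.map Prod.snd) (L - 1)) with h | h
        · exact h
        · have hc0 : pvCnt (d.map Prod.snd) (L - 1) = 0 := by omega
          have := pvNeedZeroOfCntZero L (d.map Prod.snd) hc0
          omega
      have hstretch : pvNeed (d.map Prod.snd) L
          = pvNeed (d.map Prod.snd) (L - 1) + pvCnt (d.map Prod.snd) (L - 1) := by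
        have := pvNeedSucc (L - 1) (d.map Prod.snd)
        have hL : L - 1 + 1 = L := by omega
        rw [hL] at this
        omega
      have hstep := ih d (L - 1) (pvCnt (d.map Prod.snd) (L - 1) - 1) hnd
        (by omega) (by omega) (by omega)
      rw [pvIterSucc', hstep]
      have hne : pvBuildOut d (L - 1) (pvCnt (d.map Prod.snd) (L - 1) - 1) ≠ [] := by
        obtain ⟨y, hy, _⟩ := pvBuildOutExistsL (L - 1) d (pvCnt (d.map Prod.snd) (L - 1) - 1) (by omega) (by omega)
        intro hnil; rw [hnil] at hy; simp at hy
      rcases hm : PySem.List.min? (pvBuildOut d (L - 1) (pvCnt (d.map Prod.snd) (L - 1) - 1)) (fun p => p.2) with _ | p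
      · rw [PySem.List.min?_eq_none_iff] at hm; exact absurd hm hne
      · have hpL := pvMinBuildOut (L - 1) d (pvCnt (d.map Prod.snd) (L - 1) - 1) p (by omega) (by omega) hm
        have hb := pvStepEqBump (pvBuildOut d (L - 1) (pvCnt (d.map Prod.snd) (L - 1) - 1)) p
          (by rw [pvMapFstBuildOut]; exact hnd) hm
        rw [hb, hpL, pvBumpBuildOut (L - 1) d (pvCnt (d.map Prod.snd) (L - 1) - 1) (by omega) (by omega)]
        have : pvCnt (d.map Prod.snd) (L - 1) - 1 + 1 = pvCnt (d.map Prod.snd) (L - 1) := by omega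
        rw [this, pvBuildOutRoll]
lemma pvGetDMem : ∀ (l : List Int) (k : Nat), k < l.length → l.getD k 0 ∈ l := by
  intro l
  induction l with
  | nil => intro k hk; simp at hk
  | cons x t ih =>
    intro k hk
    cases k with
    | zero => simp
    | succ k =>
      have := ih k (by simpa using hk)
      rw [List.getD_cons_succ]
      exact List.mem_cons_of_mem x this

lemma pvPairwiseGetD (w : List Int) (hp : w.Pairwise (· ≤ ·)) :
    ∀ k, k + 1 < w.length → w.getD k 0 ≤ w.getD (k + 1) 0 := by
  induction w with
  | nil => intro k hk; simp at hk
  | cons x t ih =>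
    intro k hk
    rw [List.pairwise_cons] at hp
    cases k with
    | zero =>
      have h0 : (0 : Nat) < t.length := by simpa using hk
      simp only [List.getD_cons_zero, List.getD_cons_succ]
      exact hp.1 _ (pvGetDMem t 0 h0)
    | succ k =>
      simp only [List.getD_cons_succ]
      exact ih hp.2 k (by simpa using hk)

lemma pvNeedZeroOfLe (L : Int) : ∀ (vs : List Int), (∀ v ∈ vs, L ≤ v) → pvNeed vs L = 0 := by
  intro vs
  induction vs with
  | nil => intro _; rfl
  | cons a t ih =>
    intro h
    rw [pvNeedCons, ih (fun v hv => h v (by simp [hv]))]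
    have := h a (by simp)
    omega

lemma pvNeedHead (x : Int) (t : List Int) (hp : (x :: t).Pairwise (· ≤ ·)) :
    pvNeed (x :: t) x = 0 := by
  rw [List.pairwise_cons] at hp
  apply pvNeedZeroOfLe
  intro v hv
  rcases List.mem_cons.mp hv with rfl | hv
  · exact Int.le_refl _
  · exact hp.1 v hv

lemma pvCntSorted : ∀ (w : List Int) (k : Nat) (L : Int), w.Pairwise (· ≤ ·) →
    k < w.length → w.getD k 0 ≤ L →
    (k + 1 = w.length ∨ (k + 1 < w.length ∧ L < w.getD (k + 1) 0)) →
    pvCnt w L = (k : Int) + 1 := by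
  intro w
  induction w with
  | nil => intro k L _ hk; simp at hk
  | cons x t ih =>
    intro k L hp hk hL hnext
    rw [List.pairwise_cons] at hp
    have hcons : pvCnt (x :: t) L = (if x ≤ L then 1 else 0) + pvCnt t L := by
      simp only [pvCnt, List.countP_cons]
      split <;> simp_all <;> omega
    cases k with
    | zero =>
      rw [List.getD_cons_zero] at hL
      rw [hcons, if_pos hL]
      rcases hnext with hlen | ⟨hlt, hgt⟩
      · have ht : t = [] := by
          cases t with
          | nil => rfl
          | cons z t' => simp at hlen
        subst ht
        simp [pvCnt]
      · rcases t with _ | ⟨z, t'⟩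
        · simp at hlt
        · rw [List.getD_cons_succ, List.getD_cons_zero] at hgt
          have hz : ∀ v ∈ z :: t', ¬ (v ≤ L) := by
            intro v hv
            rcases List.mem_cons.mp hv with rfl | hv
            · omega
            · have := List.rel_of_pairwise_cons hp.2 hv
              omega
          have : pvCnt (z :: t') L = 0 := by
            simp only [pvCnt]
            rw [List.countP_eq_zero.mpr (by intro a ha; simpa using hz a ha)]
            rfl
          rw [this]
          omega
    | succ k =>
      rw [List.getD_cons_succ] at hL
      have hk' : k < t.length := by simpa using hk
      have hxL : x ≤ L := by
        have := hp.1 _ (pvGetDMem t k hk')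
        omega
      rw [hcons, if_pos hxL]
      have hnext' : k + 1 = t.length ∨ (k + 1 < t.length ∧ L < t.getD (k + 1) 0) := by
        rcases hnext with hlen | ⟨hlt, hgt⟩
        · left; simpa using hlen
        · right
          refine ⟨by simpa using hlt, ?_⟩
          rw [List.getD_cons_succ] at hgt
          exact hgt
      rw [ih k L hp.2 hk' hL hnext']
      omega

lemma pvNeedStretch : ∀ (w : List Int) (k : Nat) (L : Int), w.Pairwise (· ≤ ·) →
    k < w.length → w.getD k 0 ≤ L →
    (k + 1 = w.length ∨ (k + 1 < w.length ∧ L ≤ w.getD (k + 1) 0)) →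
    pvNeed w L = pvNeed w (w.getD k 0) + ((k : Int) + 1) * (L - w.getD k 0) := by
  intro w
  induction w with
  | nil => intro k L _ hk; simp at hk
  | cons x t ih =>
    intro k L hp hk hL hnext
    rw [List.pairwise_cons] at hp
    cases k with
    | zero =>
      rw [List.getD_cons_zero] at hL ⊢
      rw [pvNeedCons, pvNeedCons]
      have hxx : max 0 (x - x) = 0 := by omega
      have hxL : max 0 (L - x) = L - x := by omega
      rw [hxx, hxL]
      have ht0 : pvNeed t x = 0 :=
        pvNeedZeroOfLe x t (fun v hv => hp.1 v hv)
      have htL : pvNeed t L = 0 := by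
        apply pvNeedZeroOfLe
        intro v hv
        rcases hnext with hlen | ⟨hlt, hge⟩
        · have ht : t = [] := by
            cases t with
            | nil => rfl
            | cons z t' => simp at hlen
          subst ht; simp at hv
        · rcases t with _ | ⟨z, t'⟩
          · simp at hv
          · rw [List.getD_cons_succ, List.getD_cons_zero] at hge
            rcases List.mem_cons.mp hv with rfl | hv
            · omega
            · have := List.rel_of_pairwise_cons hp.2 hv
              omega
      rw [ht0, htL]
      omega
    | succ k =>
      rw [List.getD_cons_succ] at hL ⊢
      have hk' : k < t.length := by simpa using hk
      have hxk : x ≤ t.getD k 0 := hp.1 _ (pvGetDMem t k hk')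
      have hnext' : k + 1 = t.length ∨ (k + 1 < t.length ∧ L ≤ t.getD (k + 1) 0) := by
        rcases hnext with hlen | ⟨hlt, hge⟩
        · left; simpa using hlen
        · right
          refine ⟨by simpa using hlt, ?_⟩
          rw [List.getD_cons_succ] at hge
          exact hge
      rw [pvNeedCons, pvNeedCons, ih k L hp.2 hk' hL hnext']
      have h1 : max 0 (L - x) = L - x := by omega
      have h2 : max 0 (t.getD k 0 - x) = t.getD k 0 - x := by omega
      rw [h1, h2]
      have hc : ((k + 1 : Nat) : Int) = (k : Int) + 1 := by omega
      rw [hc]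
      have hsplit : ((k : Int) + 1 + 1) * (L - t.getD k 0)
          = ((k : Int) + 1) * (L - t.getD k 0) + (L - t.getD k 0) := by
        rw [Int.add_mul, Int.one_mul]
      rw [hsplit]
      generalize ((k : Int) + 1) * (L - t.getD k 0) = P
      omega
lemma pvPermSum : ∀ {l₁ l₂ : List Int}, l₁.Perm l₂ → l₁.sum = l₂.sum := by
  intro l₁ l₂ h
  induction h with
  | nil => rfl
  | cons x _ ih => simp [List.sum_cons, ih]
  | swap x y l => simp [List.sum_cons]; omega
  | trans _ _ ih1 ih2 => omega

lemma pvLtOfMulLt (a b c : Int) (ha : 0 < a) (h : a * b < a * c) : b < c := by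
  rcases Int.lt_or_le b c with h' | h'
  · exact h'
  · have := Int.mul_le_mul_of_nonneg_left h' (by omega : (0:Int) ≤ a)
    omega

lemma pvLevelLoopSpec (w : List Int) (R : Int) (hp : w.Pairwise (· ≤ ·)) :
    ∀ (fuel k : Nat) (spent : Int), w.length - k ≤ fuel → k < w.length →
    spent = pvNeed w (w.getD k 0) → spent ≤ R →
    (pvLevelLoop w R k spent).1 < w.length ∧
      (pvLevelLoop w R k spent).2 = pvNeed w (w.getD (pvLevelLoop w R k spent).1 0) ∧
      (pvLevelLoop w R k spent).2 ≤ R ∧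
      ((pvLevelLoop w R k spent).1 + 1 < w.length →
        R < (pvLevelLoop w R k spent).2 +
          (((pvLevelLoop w R k spent).1 : Int) + 1) *
            (w.getD ((pvLevelLoop w R k spent).1 + 1) 0 - w.getD (pvLevelLoop w R k spent).1 0)) := by
  intro fuel
  induction fuel with
  | zero => intro k spent hf hk; omega
  | succ fuel ih =>
    intro k spent hf hk hspent hle
    have e1 : PySem.List.pyGetD w ((k : Int) + 1) 0 = w.getD (k + 1) 0 := by
      have hcast : ((k : Int) + 1) = ((k + 1 : Nat) : Int) := by omega
      rw [hcast, PySem.List.pyGetD_natCast]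
    have e2 : PySem.List.pyGetD w (k : Int) 0 = w.getD k 0 := PySem.List.pyGetD_natCast w k 0
    rw [pvLevelLoop]
    split
    · rename_i h
      have hk1 : k + 1 < w.length := h.1
      have hspent' : spent + ((k : Int) + 1) * (PySem.List.pyGetD w ((k : Int) + 1) 0 - PySem.List.pyGetD w (k : Int) 0)
          = pvNeed w (w.getD (k + 1) 0) := by
        rw [e1, e2, hspent]
        have hstretch := pvNeedStretch w k (w.getD (k + 1) 0) hp (by omega)
          (pvPairwiseGetD w hp k hk1) (Or.inr ⟨hk1, Int.le_refl _⟩)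
        omega
      exact ih (k + 1) _ (by omega) hk1 hspent' h.2
    · rename_i h
      refine ⟨hk, hspent, hle, ?_⟩
      intro hk1
      rcases Int.lt_or_le R (spent + ((k : Int) + 1) * (w.getD (k + 1) 0 - w.getD k 0)) with hgt | hle'
      · exact hgt
      · exact absurd ⟨hk1, by rw [e1, e2]; exact hle'⟩ h
lemma pvFillEq (d : List (String × Int)) (R : Nat)
    (hnd : (d.map Prod.fst).Nodup) (hne : d ≠ []) :
    pvFill d (R : Int) = pvIter pvStep R d := by
  have hfill : pvFill d (R : Int) = pvBuildOut d
      (PySem.List.pyGetD (PySem.List.sorted (d.map (fun p => p.2)) (fun v => v) false)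
        (((pvLevelLoop (PySem.List.sorted (d.map (fun p => p.2)) (fun v => v) false) (R : Int) 0 0).1 : Int)) 0
        + PySem.Int.floordiv ((R : Int) - (pvLevelLoop (PySem.List.sorted (d.map (fun p => p.2)) (fun v => v) false) (R : Int) 0 0).2)
            (((pvLevelLoop (PySem.List.sorted (d.map (fun p => p.2)) (fun v => v) false) (R : Int) 0 0).1 : Int) + 1))
      (PySem.Int.mod ((R : Int) - (pvLevelLoop (PySem.List.sorted (d.map (fun p => p.2)) (fun v => v) false) (R : Int) 0 0).2)
        (((pvLevelLoop (PySem.List.sorted (d.map (fun p => p.2)) (fun v => v) false) (R : Int) 0 0).1 : Int) + 1)) := rfl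
  rw [hfill]
  have hperm : (PySem.List.sorted (d.map (fun p => p.2)) (fun v => v) false).Perm (d.map (fun p => p.2)) :=
    PySem.List.sorted_perm _ _ _
  have hp : (PySem.List.sorted (d.map (fun p => p.2)) (fun v => v) false).Pairwise (· ≤ ·) :=
    List.Pairwise.imp (fun h => h) (PySem.List.sorted_pairwise (d.map (fun p => p.2)) (fun v => v))
  have hwne : PySem.List.sorted (d.map (fun p => p.2)) (fun v => v) false ≠ [] := by
    intro h
    rw [PySem.List.sorted_eq_nil_iff, List.map_eq_nil_iff] at h
    exact hne h
  generalize hwdef : PySem.List.sorted (d.map (fun p => p.2)) (fun v => v) false = w at *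
  have hlen : 0 < w.length := by
    cases w with
    | nil => exact absurd rfl hwne
    | cons x t => simp
  have hneed0 : pvNeed w (w.getD 0 0) = 0 := by
    cases w with
    | nil => exact absurd rfl hwne
    | cons x t => rw [List.getD_cons_zero]; exact pvNeedHead x t hp
  have hspec := pvLevelLoopSpec w (R : Int) hp w.length 0 0 (by omega) hlen hneed0.symm
    (by exact Int.natCast_nonneg R)
  generalize hksdef : pvLevelLoop w (R : Int) 0 0 = ks at *
  obtain ⟨hk, hs, hsle, hstop⟩ := hspec
  have hb : (0 : Int) < (ks.1 : Int) + 1 := by omega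
  have hextra : 0 ≤ (R : Int) - ks.2 := by omega
  have hq : PySem.Int.floordiv ((R : Int) - ks.2) ((ks.1 : Int) + 1)
      = ((R : Int) - ks.2) / ((ks.1 : Int) + 1) := by
    show Int.fdiv _ _ = _
    rw [Int.fdiv_eq_ediv, if_pos (Or.inl (by omega))]
    omega
  have hr : PySem.Int.mod ((R : Int) - ks.2) ((ks.1 : Int) + 1)
      = ((R : Int) - ks.2) % ((ks.1 : Int) + 1) := by
    show Int.fmod _ _ = _
    rw [Int.fmod_eq_emod, if_pos (Or.inl (by omega))]
    omega
  rw [hq, hr, PySem.List.pyGetD_natCast]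
  have hqr := Int.ediv_add_emod ((R : Int) - ks.2) ((ks.1 : Int) + 1)
  have hr0 : 0 ≤ ((R : Int) - ks.2) % ((ks.1 : Int) + 1) := Int.emod_nonneg _ (by omega)
  have hrb : ((R : Int) - ks.2) % ((ks.1 : Int) + 1) < (ks.1 : Int) + 1 := Int.emod_lt_of_pos _ hb
  have hq0 : 0 ≤ ((R : Int) - ks.2) / ((ks.1 : Int) + 1) := Int.ediv_nonneg hextra (by omega)
  have hL1 : w.getD ks.1 0 ≤ w.getD ks.1 0 + ((R : Int) - ks.2) / ((ks.1 : Int) + 1) := by omega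
  have hqlt : ks.1 + 1 < w.length →
      ((R : Int) - ks.2) / ((ks.1 : Int) + 1) < w.getD (ks.1 + 1) 0 - w.getD ks.1 0 := by
    intro hk1
    have hgt := hstop hk1
    apply pvLtOfMulLt ((ks.1 : Int) + 1) _ _ hb
    have hble : ((ks.1 : Int) + 1) * (((R : Int) - ks.2) / ((ks.1 : Int) + 1)) ≤ (R : Int) - ks.2 := by
      generalize ((ks.1 : Int) + 1) * (((R : Int) - ks.2) / ((ks.1 : Int) + 1)) = P at hqr
      omega
    omega
  have hnext : ks.1 + 1 = w.length ∨ (ks.1 + 1 < w.length ∧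
      w.getD ks.1 0 + ((R : Int) - ks.2) / ((ks.1 : Int) + 1) < w.getD (ks.1 + 1) 0) := by
    rcases Nat.lt_or_ge (ks.1 + 1) w.length with h | h
    · right; exact ⟨h, by have := hqlt h; omega⟩
    · left; omega
  have hcnt := pvCntSorted w ks.1 (w.getD ks.1 0 + ((R : Int) - ks.2) / ((ks.1 : Int) + 1)) hp hk hL1 hnext
  have hstretch := pvNeedStretch w ks.1 (w.getD ks.1 0 + ((R : Int) - ks.2) / ((ks.1 : Int) + 1)) hp hk hL1
    (by rcases hnext with h | ⟨h1, h2⟩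
        · exact Or.inl h
        · exact Or.inr ⟨h1, by omega⟩)
  -- transfer need and cnt to d's values
  have hmapeq : d.map (fun p => p.2) = d.map Prod.snd := rfl
  have hneedP : pvNeed (d.map Prod.snd) (w.getD ks.1 0 + ((R : Int) - ks.2) / ((ks.1 : Int) + 1))
      = pvNeed w (w.getD ks.1 0 + ((R : Int) - ks.2) / ((ks.1 : Int) + 1)) := by
    simp only [pvNeed]
    exact pvPermSum ((List.Perm.map _ (hmapeq ▸ hperm)).symm)
  have hcntP : pvCnt (d.map Prod.snd) (w.getD ks.1 0 + ((R : Int) - ks.2) / ((ks.1 : Int) + 1))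
      = pvCnt w (w.getD ks.1 0 + ((R : Int) - ks.2) / ((ks.1 : Int) + 1)) := by
    simp only [pvCnt]
    rw [List.Perm.countP_eq _ ((hmapeq ▸ hperm).symm : (d.map Prod.snd).Perm w)]
  refine (pvMainT R d _ _ hnd ?_ hr0 ?_).symm
  · rw [hneedP, hstretch]
    have he : w.getD ks.1 0 + ((R : Int) - ks.2) / ((ks.1 : Int) + 1) - w.getD ks.1 0
        = ((R : Int) - ks.2) / ((ks.1 : Int) + 1) := by omega
    rw [he]
    generalize ((ks.1 : Int) + 1) * (((R : Int) - ks.2) / ((ks.1 : Int) + 1)) = P at hqr ⊢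
    omega
  · rw [hcntP, hcnt]
    omega
lemma pvLenIter (n : Nat) (d : List (String × Int)) :
    (pvIter pvStep n d).length = d.length := by
  have := congrArg List.length (pvMapFstIter n d)
  simpa using this

lemma pvAStepEq (tour : Nat) (d : List (String × Int)) (hg : (tour : Int) < (d.length : Int)) :
    pvAStep tour d = pvStep d := by
  unfold pvAStep pvStep
  split
  · rfl
  · rw [if_pos hg]

lemma pvIterGuard0 : ∀ (n : Nat) (d : List (String × Int)), d ≠ [] →
    pvIter (fun d => pvAStep 0 d) n d = pvIter pvStep n d := by
  intro n
  induction n with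
  | zero => intro d _; rfl
  | succ n ih =>
    intro d hne
    show pvIter _ n (pvAStep 0 d) = pvIter pvStep n (pvStep d)
    have hlen : 0 < d.length := by
      rcases d with _ | ⟨a, t⟩
      · exact absurd rfl hne
      · simp
    have hg : ((0 : Nat) : Int) < (d.length : Int) := by omega
    rw [pvAStepEq 0 d hg]
    apply ih
    intro h
    have := pvLenStep d
    rw [h] at this
    simp at this
    omega

lemma pvIterGuard1 : ∀ (n : Nat) (d : List (String × Int)), 1 < d.length →
    pvIter (fun d => pvAStep 1 d) n d = pvIter pvStep n d := by
  intro n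
  induction n with
  | zero => intro d _; rfl
  | succ n ih =>
    intro d hlen
    show pvIter _ n (pvAStep 1 d) = pvIter pvStep n (pvStep d)
    have hg : ((1 : Nat) : Int) < (d.length : Int) := by omega
    rw [pvAStepEq 1 d hg]
    apply ih
    rw [pvLenStep d]
    exact hlen

lemma pvIterGuard1One : ∀ (n : Nat) (d : List (String × Int)), d.length = 1 →
    pvIter (fun d => pvAStep 1 d) n d = d := by
  intro n
  induction n with
  | zero => intro d _; rfl
  | succ n ih =>
    intro d hlen
    show pvIter _ n (pvAStep 1 d) = d
    have hstep : pvAStep 1 d = d := by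
      unfold pvAStep
      split
      · rfl
      · rw [if_neg (by omega : ¬ ((1 : Nat) : Int) < (d.length : Int))]
    rw [hstep]
    exact ih d hlen

-- ===== VERDICT (by name: the statement is the Claim_ definition above) =====
theorem make_dispo_dict_spec : Claim_equal_make_dispo_dict := by
  intro residents am _ hpre
  show make_dispo_dict residents am = make_dispo_dict_alt residents am
  by_cases ham : am = []
  · simp only [make_dispo_dict, make_dispo_dict_alt, if_pos ham]
  · have hlen0 : 0 < am.length := by
      rcases am with _ | ⟨a, t⟩
      · exact absurd rfl ham
      · simp
    simp only [make_dispo_dict, make_dispo_dict_alt, if_neg ham]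
    have hr2 : List.range 2 = [0, 1] := rfl
    rw [hr2]
    simp only [List.foldl_cons, List.foldl_nil]
    rw [pvFoldlRangeConst (pvAStep 0), pvFoldlRangeConst (pvAStep 1)]
    rw [pvIterGuard0 residents.length am ham]
    have hfill1 : pvFill am (residents.length : Int) = pvIter pvStep residents.length am :=
      pvFillEq am residents.length hpre ham
    have hnd1 : ((pvIter pvStep residents.length am).map Prod.fst).Nodup := by
      rw [pvMapFstIter]; exact hpre
    have hlen1 : (pvIter pvStep residents.length am).length = am.length := pvLenIter _ _
    have hne1 : pvIter pvStep residents.length am ≠ [] := by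
      intro h
      rw [h] at hlen1
      simp at hlen1
      omega
    have hlenfill : (pvFill am (residents.length : Int)).length = am.length := by
      rw [hfill1]; exact hlen1
    by_cases h1 : 1 < am.length
    · rw [pvIterGuard1 residents.length _ (by rw [hlen1]; exact h1)]
      rw [if_pos (by rw [hlenfill]; exact h1)]
      have hfill2 : pvFill (pvIter pvStep residents.length am) (residents.length : Int)
          = pvIter pvStep residents.length (pvIter pvStep residents.length am) :=
        pvFillEq _ residents.length hnd1 hne1
      rw [hfill1, hfill2]
      simp
    · have hl1 : am.length = 1 := by omega
      rw [pvIterGuard1One residents.length _ (by rw [hlen1]; exact hl1)]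
      rw [if_neg (by rw [hlenfill]; omega)]
      rw [hfill1]
      simp
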